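-- pv_equiv track=rewrite | github.com/AHCChan/BioSeq_Consensus | BioSeq_Consensus.py | Parse_Standard_Consensus_Sequence
-- ===== SOURCE A (Python) =====
-- STR__invalid_consensus_seq = "\nERROR: Invalid consensus sequence:\n\t{s}"
--
-- def Parse_Standard_Consensus_Sequence(string):
--     """
--     Return a standard-format consensus sequence as a list of strings. Each
--     string contains the possible basic nucleotides at the corresponding
--     position.
--
--     Multiple possible residues at a position are denoted by square brackets,
--     while repeats of the same residue are denoted by curly brackets.
--
--     E.x:
--         "A[TG]C(3)A"
--     ->
--         ["A", "TG", "C", "C", "C", "A"]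
--
--     @string
--             (str)
--             The consensus sequence.
--
--     Parse_Standard_Consensus_Sequence(str) -> list<str>
--     """
--     result = []
--     # Setup
--     length = len(string)
--     range_ = range(length)
--     flag_brackets_curve = False
--     flag_brackets_square = False
--     sb_prev = ""
--     sb_multi = ""
--     sb_number = ""
--     # Main loop
--     for i in range_:
--         c = string[i]
--         # Number
--         if c.isdigit():
--             if (not flag_brackets_curve) or flag_brackets_square:
--                 raise Exception(STR__invalid_consensus_seq.format(s=string))
--             sb_number += c
--         # Open brackets (curved)
--         elif c == "(":
--             if flag_brackets_curve or flag_brackets_square: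
--                 raise Exception(STR__invalid_consensus_seq.format(s=string))
--             flag_brackets_curve = True
--         # Close brackets (curved)
--         elif c == ")":
--             if (not flag_brackets_curve) or flag_brackets_square:
--                 raise Exception(STR__invalid_consensus_seq.format(s=string))
--             try:
--                 number = int(sb_number) - 1
--             except:
--                 raise Exception(STR__invalid_consensus_seq.format(s=string))
--             result += [sb_prev] * number
--             sb_number = ""
--             flag_brackets_curve = False
--         # Open brackets (square)
--         elif c == "[":
--             if flag_brackets_curve or flag_brackets_square:
--                 raise Exception(STR__invalid_consensus_seq.format(s=string))
--             flag_brackets_square = True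
--         # Close brackets (square)
--         elif c == "]":
--             if flag_brackets_curve or (not flag_brackets_square):
--                 raise Exception(STR__invalid_consensus_seq.format(s=string))
--             result.append(sb_multi)
--             sb_multi = ""
--             flag_brackets_square = False
--         # Other
--         else:
--             # In curve brackets
--             if flag_brackets_curve and (not flag_brackets_square):
--                 sb_number += c
--             # In square brackets
--             elif (not flag_brackets_curve) and flag_brackets_square:
--                 sb_multi += c
--             # Other
--             else:
--                 result.append(c)
--                 sb_prev = c
--     # Follow up
--     if flag_brackets_curve or flag_brackets_square:
--         raise Exception(STR__invalid_consensus_seq.format(s=string))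
--     # Return
--     return result
-- ===== SOURCE B (Python) =====
-- STR__invalid_consensus_seq = "\nERROR: Invalid consensus sequence:\n\t{s}"
--
-- def Parse_Standard_Consensus_Sequence(string):
--     # Index-driven scanner: jump group-to-group instead of a flag-based per-char machine.
--     result = []
--     prev = ""
--     i = 0
--     n = len(string)
--     while i < n:
--         c = string[i]
--         if c.isdigit() or c == ")" or c == "]":
--             raise Exception(STR__invalid_consensus_seq.format(s=string))
--         if c == "(":
--             j = string.find(")", i + 1)
--             if j == -1:
--                 raise Exception(STR__invalid_consensus_seq.format(s=string))
--             try: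
--                 num = int(string[i + 1:j])
--             except:
--                 raise Exception(STR__invalid_consensus_seq.format(s=string))
--             result += [prev] * (num - 1)
--             i = j + 1
--         elif c == "[":
--             j = string.find("]", i + 1)
--             if j == -1:
--                 raise Exception(STR__invalid_consensus_seq.format(s=string))
--             content = string[i + 1:j]
--             if any(x.isdigit() or x in "()[" for x in content):
--                 raise Exception(STR__invalid_consensus_seq.format(s=string))
--             result.append(content)
--             i = j + 1
--         else:
--             result.append(c)
--             prev = c
--             i += 1
--     return result
-- ===== Notes on version B (the rewrite author's own statement) =====
-- stated objective: alternative
-- what changed: Replaces A's flag-based per-character state machine (boolean bracket flags and incremental sb_multi/sb_number buffers) by an index-driven scanner that, at each '[' or '(', jumps straight to the matching close bracket with string.find and takes the enclosed substring in one slice.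
import Mathlib
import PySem

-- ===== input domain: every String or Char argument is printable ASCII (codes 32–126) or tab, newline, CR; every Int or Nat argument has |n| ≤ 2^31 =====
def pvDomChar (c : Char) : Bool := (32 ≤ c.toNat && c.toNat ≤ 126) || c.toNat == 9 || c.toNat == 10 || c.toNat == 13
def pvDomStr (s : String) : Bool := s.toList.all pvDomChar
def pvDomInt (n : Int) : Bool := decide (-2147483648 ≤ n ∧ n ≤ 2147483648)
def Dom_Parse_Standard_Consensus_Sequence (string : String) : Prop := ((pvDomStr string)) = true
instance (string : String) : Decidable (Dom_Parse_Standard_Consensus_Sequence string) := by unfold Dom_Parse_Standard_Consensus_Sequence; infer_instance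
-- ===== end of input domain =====

-- B replaces A's flag-based per-character state machine by an index-driven scanner that
-- jumps from group to group (alternative decomposition, same cost); on inputs where the
-- Python A raises, both pythons raise and the ports return [] — those are outside Pre_.

-- ===== PORT A =====
-- A's per-char loop: state (flag_curve, flag_square, sb_prev, sb_multi, sb_number, result);
-- `none` marks the points where the Python raises.
def pvAGo : List Char → Bool → Bool → List Char → List Char → List Char → List String →
    Option (List String)
  | [], fc, fs, _, _, _, res => if fc || fs then none else some res
  | c :: rest, fc, fs, prev, multi, number, res =>
    if PySem.Chars.isdigit c then
      if (!fc) || fs then none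
      else pvAGo rest fc fs prev multi (number ++ [c]) res
    else if c = '(' then
      if fc || fs then none else pvAGo rest true fs prev multi number res
    else if c = ')' then
      if (!fc) || fs then none
      else
        match PySem.Int.ofChars? number with
        | none => none
        | some m =>
          pvAGo rest false fs prev multi []
            (res ++ List.replicate (m - 1).toNat (String.ofList prev))
    else if c = '[' then
      if fc || fs then none else pvAGo rest fc true prev multi number res
    else if c = ']' then
      if fc || (!fs) then none
      else pvAGo rest fc false prev [] number (res ++ [String.ofList multi])
    else if fc && (!fs) then pvAGo rest fc fs prev multi (number ++ [c]) res
    else if (!fc) && fs then pvAGo rest fc fs prev (multi ++ [c]) number res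
    else pvAGo rest fc fs [c] multi number (res ++ [String.ofList [c]])

def Parse_Standard_Consensus_Sequence (string : String) : List String :=
  (pvAGo string.toList false false [] [] [] []).getD []

-- ===== PORT B =====
-- Source B's `string.find(close, i+1)` + slice: split at the first occurrence of `t`.
def pvFindClose (t : Char) : List Char → Option (List Char × List Char)
  | [] => none
  | c :: rest =>
    if c = t then some ([], rest)
    else (pvFindClose t rest).map (fun p => (c :: p.1, p.2))

theorem pvFindClose_length_lt {t : Char} : ∀ {l : List Char} {p r : List Char},
    pvFindClose t l = some (p, r) → r.length < l.length := by
  intro l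
  induction l with
  | nil => intro p r h; simp [pvFindClose] at h
  | cons c rest ih =>
    intro p r h
    simp only [pvFindClose] at h
    split at h
    · cases h; simp
    · cases hf : pvFindClose t rest with
      | none => rw [hf] at h; simp at h
      | some q =>
        rw [hf] at h
        simp only [Option.map_some] at h
        cases h
        have := ih (p := q.1) (r := q.2) (by rw [hf])
        simp only [List.length_cons]
        omega

-- Source B's while loop: index-driven scanner, `none` where the Python raises.
def pvBGo : List Char → List Char → List String → Option (List String)
  | [], _, res => some res
  | c :: rest, prev, res =>
    if PySem.Chars.isdigit c || c = ')' || c = ']' then none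
    else if c = '(' then
      match h : pvFindClose ')' rest with
      | none => none
      | some (content, rest') =>
        match PySem.Int.ofChars? content with
        | none => none
        | some m =>
          pvBGo rest' prev (res ++ List.replicate (m - 1).toNat (String.ofList prev))
    else if c = '[' then
      match h : pvFindClose ']' rest with
      | none => none
      | some (content, rest') =>
        if content.any
            (fun x => PySem.Chars.isdigit x || x = '(' || x = ')' || x = '[') then none
        else pvBGo rest' prev (res ++ [String.ofList content])
    else pvBGo rest [c] (res ++ [String.ofList [c]])
  termination_by l => l.length
  decreasing_by
  · exact Nat.lt_trans (pvFindClose_length_lt h) (by simp)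
  · exact Nat.lt_trans (pvFindClose_length_lt h) (by simp)
  · simp

def Parse_Standard_Consensus_Sequence_alt (string : String) : List String :=
  (pvBGo string.toList [] []).getD []

-- ===== PRECONDITION & SPEC =====
-- Pre_ excludes exactly the inputs on which the Python A raises its "invalid consensus
-- sequence" Exception (a digit or stray ')'/']' at top level, an unclosed or nested group,
-- a digit or bracket inside [...], a bracket inside (...) or (...) content that is not
-- int()-parsable): the regular grammar of well-formed consensus strings, checked by a
-- three-mode automaton (mode none = top level, some (true, buf) = inside (...) with the
-- collected content buf, some (false, _) = inside [...]).
def pvValidGo : List Char → Option (Bool × List Char) → Bool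
  | [], mode => mode.isNone
  | c :: rest, none =>
    if PySem.Chars.isdigit c || c = ')' || c = ']' then false
    else if c = '(' then pvValidGo rest (some (true, []))
    else if c = '[' then pvValidGo rest (some (false, []))
    else pvValidGo rest none
  | c :: rest, some (true, buf) =>
    if c = ')' then (PySem.Int.ofChars? buf).isSome && pvValidGo rest none
    else if c = '(' || c = '[' || c = ']' then false
    else pvValidGo rest (some (true, buf ++ [c]))
  | c :: rest, some (false, _) =>
    if c = ']' then pvValidGo rest none
    else if PySem.Chars.isdigit c || c = '(' || c = ')' || c = '[' then false
    else pvValidGo rest (some (false, []))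

def Pre_Parse_Standard_Consensus_Sequence (string : String) : Prop :=
  pvValidGo string.toList none = true
instance (string : String) : Decidable (Pre_Parse_Standard_Consensus_Sequence string) := by
  unfold Pre_Parse_Standard_Consensus_Sequence; infer_instance

def pvWitness_Parse_Standard_Consensus_Sequence : String := "A[TG]C(3)A"

def Spec_Parse_Standard_Consensus_Sequence (string : String) (out : List String) : Prop :=
  out = Parse_Standard_Consensus_Sequence_alt string
instance (string : String) (out : List String) :
    Decidable (Spec_Parse_Standard_Consensus_Sequence string out) := by
  unfold Spec_Parse_Standard_Consensus_Sequence; infer_instance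

-- ===== CLAIM (what is proved, stated in full; the proofs are below) =====
def Claim_equal_Parse_Standard_Consensus_Sequence : Prop :=
  ∀ (string : String), Dom_Parse_Standard_Consensus_Sequence string →
    Pre_Parse_Standard_Consensus_Sequence string →
    Spec_Parse_Standard_Consensus_Sequence string (Parse_Standard_Consensus_Sequence string)

-- ===== LEMMAS AND PROOFS =====

theorem pvFindClose_split {t : Char} : ∀ {l p r : List Char},
    pvFindClose t l = some (p, r) → l = p ++ t :: r ∧ t ∉ p := by
  intro l
  induction l with
  | nil => intro p r h; simp [pvFindClose] at h
  | cons c rest ih =>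
    intro p r h
    simp only [pvFindClose] at h
    split at h
    · rename_i hc; cases h; simpa using hc
    · rename_i hc
      cases hf : pvFindClose t rest with
      | none => rw [hf] at h; simp at h
      | some q =>
        rw [hf] at h
        simp only [Option.map_some] at h
        cases h
        obtain ⟨h1, h2⟩ := ih (by rw [hf])
        constructor
        · simp [h1]
        · simp [h2]; exact fun he => hc he.symm

-- one-step facts about pvFindClose and the pvValidGo automaton
theorem pvFindClose_none {t : Char} : ∀ {l : List Char}, pvFindClose t l = none → t ∉ l := by
  intro l
  induction l with
  | nil => intro _; simp
  | cons c rest ih =>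
    intro h
    simp only [pvFindClose] at h
    split at h
    · simp at h
    · rename_i hc
      cases hf : pvFindClose t rest with
      | none =>
        have hcc : ¬t = c := fun he => hc (Eq.symm he)
        simp [hcc, ih hf]
      | some q => rw [hf] at h; simp at h

theorem pvValidGo_no_close_curve : ∀ {rest : List Char} (buf : List Char), ')' ∉ rest →
    pvValidGo rest (some (true, buf)) = false := by
  intro rest
  induction rest with
  | nil => intro buf _; rfl
  | cons c rest ih =>
    intro buf h
    simp only [List.mem_cons, not_or] at h
    obtain ⟨h1, h2⟩ := h
    have hc : ¬c = ')' := fun he => h1 (Eq.symm he)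
    by_cases hb : (c = '(' || c = '[' || c = ']') = true
    · simp [pvValidGo, hc, hb]
    · have hbf := eq_false_of_ne_true hb
      simp [pvValidGo, hc, hbf, ih _ h2]

theorem pvValidGo_no_close_square : ∀ {rest : List Char} (b : List Char), ']' ∉ rest →
    pvValidGo rest (some (false, b)) = false := by
  intro rest
  induction rest with
  | nil => intro b _; rfl
  | cons c rest ih =>
    intro b h
    simp only [List.mem_cons, not_or] at h
    obtain ⟨h1, h2⟩ := h
    have hc : ¬c = ']' := fun he => h1 (Eq.symm he)
    by_cases hb : (PySem.Chars.isdigit c || c = '(' || c = ')' || c = '[') = true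
    · simp [pvValidGo, hc, hb]
    · have hbf := eq_false_of_ne_true hb
      simp [pvValidGo, hc, hbf, ih _ h2]

theorem pvValidGo_curve : ∀ (content buf rest : List Char), ')' ∉ content →
    pvValidGo (content ++ ')' :: rest) (some (true, buf)) =
      ((content.all fun x => !(decide (x = '(') || decide (x = '[') || decide (x = ']'))) &&
        (PySem.Int.ofChars? (buf ++ content)).isSome && pvValidGo rest none) := by
  intro content
  induction content with
  | nil => intro buf rest _; simp [pvValidGo]
  | cons c content ih =>
    intro buf rest h
    simp only [List.mem_cons, not_or] at h
    obtain ⟨h1, h2⟩ := h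
    have hc : ¬c = ')' := fun he => h1 (Eq.symm he)
    by_cases hb : (c = '(' || c = '[' || c = ']') = true
    · simp only [Bool.or_eq_true, decide_eq_true_eq] at hb
      rcases hb with (hb | hb) | hb <;> subst hb <;> simp [pvValidGo, hc]
    · have hbf := eq_false_of_ne_true hb
      simp only [Bool.or_eq_false_iff, decide_eq_false_iff_not] at hbf
      obtain ⟨⟨hb1, hb2⟩, hb3⟩ := hbf
      simp only [List.cons_append, pvValidGo, if_neg hc, hb1, hb2, hb3, decide_false,
        Bool.or_self, Bool.false_or, Bool.or_false, if_false, Bool.false_eq_true]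
      rw [ih (buf ++ [c]) rest h2]
      simp [hb1, hb2, hb3]

theorem pvValidGo_square : ∀ (content rest b : List Char), ']' ∉ content →
    pvValidGo (content ++ ']' :: rest) (some (false, b)) =
      ((content.all fun x =>
          !(PySem.Chars.isdigit x || decide (x = '(') || decide (x = ')') ||
            decide (x = '['))) && pvValidGo rest none) := by
  intro content
  induction content with
  | nil => intro rest b _; simp [pvValidGo]
  | cons c content ih =>
    intro rest b h
    simp only [List.mem_cons, not_or] at h
    obtain ⟨h1, h2⟩ := h
    have hc : ¬c = ']' := fun he => h1 (Eq.symm he)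
    by_cases hb : (PySem.Chars.isdigit c || c = '(' || c = ')' || c = '[') = true
    · simp only [Bool.or_eq_true, decide_eq_true_eq] at hb
      rcases hb with ((hb | hb) | hb) | hb
      · simp [pvValidGo, hc, hb]
      · subst hb; simp [pvValidGo, hc]
      · subst hb; simp [pvValidGo, hc]
      · subst hb; simp [pvValidGo, hc]
    · have hbf := eq_false_of_ne_true hb
      simp only [Bool.or_eq_false_iff, decide_eq_false_iff_not] at hbf
      obtain ⟨⟨⟨hb1, hb2⟩, hb3⟩, hb4⟩ := hbf
      simp only [List.cons_append, pvValidGo, if_neg hc, hb1, hb2, hb3, hb4, decide_false,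
        Bool.or_self, Bool.false_or, Bool.or_false, if_false, Bool.false_eq_true]
      rw [ih rest [] h2]
      simp [hb1, hb2, hb3, hb4]

theorem pvValidGo_plain {c : Char} {rest : List Char} (hd : PySem.Chars.isdigit c = false)
    (h2 : ¬c = ')') (h3 : ¬c = ']') (hcu : ¬c = '(') (hsq : ¬c = '[') :
    pvValidGo (c :: rest) none = pvValidGo rest none := by
  simp [pvValidGo, hd, h2, h3, hcu, hsq]

theorem pvBGo_curve {rest content rest' : List Char} (prev : List Char) (res : List String)
    (hf : pvFindClose ')' rest = some (content, rest')) :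
    pvBGo ('(' :: rest) prev res =
      (match PySem.Int.ofChars? content with
       | none => none
       | some m =>
         pvBGo rest' prev (res ++ List.replicate (m - 1).toNat (String.ofList prev))) := by
  rw [pvBGo, hf]; rfl

theorem pvBGo_square {rest content rest' : List Char} (prev : List Char) (res : List String)
    (hf : pvFindClose ']' rest = some (content, rest')) :
    pvBGo ('[' :: rest) prev res =
      (if content.any
          (fun x => PySem.Chars.isdigit x || x = '(' || x = ')' || x = '[') then none
       else pvBGo rest' prev (res ++ [String.ofList content])) := by
  rw [pvBGo, hf]; rfl

theorem pvBGo_plain {c : Char} {rest : List Char} (prev : List Char) (res : List String)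
    (hd : PySem.Chars.isdigit c = false) (h2 : ¬c = ')') (h3 : ¬c = ']')
    (hcu : ¬c = '(') (hsq : ¬c = '[') :
    pvBGo (c :: rest) prev res = pvBGo rest [c] (res ++ [String.ofList [c]]) := by
  rw [pvBGo]; simp [hd, h2, h3, hcu, hsq]

-- square-bracket phase of A's machine: the '[...]' content is consumed into sb_multi
theorem pvAGo_square : ∀ (content : List Char),
    (∀ x ∈ content,
      (PySem.Chars.isdigit x || x = '(' || x = ')' || x = '[' || x = ']') = false) →
    ∀ (rest prev multi number : List Char) (res : List String),
    pvAGo (content ++ ']' :: rest) false true prev multi number res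
      = pvAGo rest false false prev [] number (res ++ [String.ofList (multi ++ content)]) := by
  intro content
  induction content with
  | nil =>
    intro _ rest prev multi number res
    have hdq : PySem.Chars.isdigit ']' = false := by decide
    simp [pvAGo, hdq]
  | cons c content ih =>
    intro hc rest prev multi number res
    have h := hc c (by simp)
    simp only [Bool.or_eq_false_iff, decide_eq_false_iff_not] at h
    obtain ⟨⟨⟨⟨hd, h1⟩, h2⟩, h3⟩, h4⟩ := h
    simp only [List.cons_append, pvAGo, hd, h1, h2, h3, h4, if_false, Bool.false_and,
      Bool.not_false, Bool.true_and, if_true, Bool.false_eq_true]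
    rw [ih (fun x hx => hc x (by simp [hx]))]
    simp

-- curved-bracket phase of A's machine: the '(...)' content is consumed into sb_number
theorem pvAGo_curve : ∀ (content : List Char),
    (∀ x ∈ content, (x = '(' || x = ')' || x = '[' || x = ']') = false) →
    ∀ (rest prev multi number : List Char) (res : List String),
    pvAGo (content ++ ')' :: rest) true false prev multi number res
      = (match PySem.Int.ofChars? (number ++ content) with
         | none => none
         | some m =>
           pvAGo rest false false prev multi []
             (res ++ List.replicate (m - 1).toNat (String.ofList prev))) := by
  intro content
  induction content with
  | nil =>
    intro _ rest prev multi number res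
    have hdq : PySem.Chars.isdigit ')' = false := by decide
    simp [pvAGo, hdq]
  | cons c content ih =>
    intro hc rest prev multi number res
    have h := hc c (by simp)
    simp only [Bool.or_eq_false_iff, decide_eq_false_iff_not] at h
    obtain ⟨⟨⟨h1, h2⟩, h3⟩, h4⟩ := h
    have step : pvAGo ((c :: content) ++ ')' :: rest) true false prev multi number res
        = pvAGo (content ++ ')' :: rest) true false prev multi (number ++ [c]) res := by
      by_cases hd : PySem.Chars.isdigit c = true
      · simp [pvAGo, hd]
      · simp only [Bool.not_eq_true] at hd
        simp [pvAGo, hd, h1, h2, h3, h4]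
    rw [step, ih (fun x hx => hc x (by simp [hx]))]
    simp

-- main loop correspondence, by fuel on the length of the remaining input
theorem pvMain : ∀ (n : Nat) (l : List Char), l.length ≤ n → pvValidGo l none = true →
    ∀ (prev : List Char) (res : List String),
    pvAGo l false false prev [] [] res = pvBGo l prev res := by
  intro n
  induction n with
  | zero =>
    intro l hl _ prev res
    have : l = [] := List.length_eq_zero_iff.mp (Nat.le_zero.mp hl)
    subst this; simp [pvAGo, pvBGo]
  | succ n ih =>
    intro l hl hv prev res
    cases l with
    | nil => simp [pvAGo, pvBGo]
    | cons c rest =>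
      by_cases hbad : (PySem.Chars.isdigit c || c = ')' || c = ']') = true
      · rw [pvValidGo] at hv; rw [hbad] at hv; simp at hv
      · have hbad' := hbad
        simp only [Bool.or_eq_true, decide_eq_true_eq, not_or, Bool.not_eq_true] at hbad'
        obtain ⟨⟨hd, h2⟩, h3⟩ := hbad'
        by_cases hcu : c = '('
        · subst hcu
          have hstep : pvValidGo ('(' :: rest) none = pvValidGo rest (some (true, [])) := by
            simp [pvValidGo, hd]
          rw [hstep] at hv
          cases hf : pvFindClose ')' rest with
          | none =>
            rw [pvValidGo_no_close_curve [] (pvFindClose_none hf)] at hv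
            simp at hv
          | some pr =>
            obtain ⟨content, rest'⟩ := pr
            obtain ⟨hsplit, hnotin⟩ := pvFindClose_split hf
            have hlen := pvFindClose_length_lt hf
            rw [hsplit, pvValidGo_curve content [] rest' hnotin] at hv
            simp only [List.nil_append, Bool.and_eq_true, List.all_eq_true,
              Option.isSome_iff_exists, Bool.not_eq_true', Bool.or_eq_false_iff,
              decide_eq_false_iff_not] at hv
            obtain ⟨⟨hall, m, hm⟩, hv'⟩ := hv
            rw [pvBGo_curve prev res hf, hm]
            have ha : pvAGo ('(' :: rest) false false prev [] [] res
                = pvAGo rest true false prev [] [] res := by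
              simp [pvAGo, hd]
            rw [ha, hsplit, pvAGo_curve content
              (fun x hx => by
                obtain ⟨⟨hx1, hx3⟩, hx4⟩ := hall x hx
                have hx2 : x ≠ ')' := fun he => hnotin (he ▸ hx)
                simp [hx1, hx2, hx3, hx4])]
            simp only [List.nil_append, hm]
            rw [ih rest' (by simp at hl; omega) hv']
        · by_cases hsq : c = '['
          · subst hsq
            have hstep : pvValidGo ('[' :: rest) none = pvValidGo rest (some (false, [])) := by
              simp [pvValidGo, hd]
            rw [hstep] at hv
            cases hf : pvFindClose ']' rest with
            | none =>
              rw [pvValidGo_no_close_square [] (pvFindClose_none hf)] at hv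
              simp at hv
            | some pr =>
              obtain ⟨content, rest'⟩ := pr
              obtain ⟨hsplit, hnotin⟩ := pvFindClose_split hf
              have hlen := pvFindClose_length_lt hf
              rw [hsplit, pvValidGo_square content rest' [] hnotin] at hv
              simp only [Bool.and_eq_true, List.all_eq_true, Bool.not_eq_true',
                Bool.or_eq_false_iff, decide_eq_false_iff_not] at hv
              obtain ⟨hall, hv'⟩ := hv
              have hany : (content.any
                  (fun x => PySem.Chars.isdigit x || x = '(' || x = ')' || x = '[')) = false := by
                simp only [List.any_eq_false, Bool.or_eq_false_iff,
                  decide_eq_false_iff_not, Bool.not_eq_true]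
                intro x hx
                exact hall x hx
              rw [pvBGo_square prev res hf, hany]
              simp only [Bool.false_eq_true, if_false]
              have ha : pvAGo ('[' :: rest) false false prev [] [] res
                  = pvAGo rest false true prev [] [] res := by
                simp [pvAGo, hd]
              rw [ha, hsplit, pvAGo_square content
                (fun x hx => by
                  obtain ⟨⟨⟨hx1, hx2⟩, hx3⟩, hx5⟩ := hall x hx
                  have hx4 : x ≠ ']' := fun he => hnotin (he ▸ hx)
                  simp [hx1, hx2, hx3, hx4, hx5])]
              simp only [List.nil_append]
              rw [ih rest' (by simp at hl; omega) hv']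
          · -- plain character
            rw [pvValidGo_plain hd h2 h3 hcu hsq] at hv
            rw [pvBGo_plain prev res hd h2 h3 hcu hsq]
            have ha : pvAGo (c :: rest) false false prev [] [] res
                = pvAGo rest false false [c] [] [] (res ++ [String.ofList [c]]) := by
              simp [pvAGo, hd, h2, h3, hcu, hsq]
            rw [ha, ih rest (by simp at hl; omega) hv]

-- ===== VERDICT (by name: the statement is the Claim_ definition above) =====
theorem Parse_Standard_Consensus_Sequence_spec :
    Claim_equal_Parse_Standard_Consensus_Sequence := by
  intro string _ hpre
  unfold Spec_Parse_Standard_Consensus_Sequence Parse_Standard_Consensus_Sequence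
    Parse_Standard_Consensus_Sequence_alt
  rw [pvMain string.toList.length string.toList le_rfl hpre]
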